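-- pv_equiv track=rewrite | github.com/JamiCode/Reddit-Stock-Scraper-Project | reddit_stocks_scraper/reddit/functions/func.py | characters_remover
-- ===== SOURCE A (Python) =====
-- def characters_remover(dataset : list):
-- 	""" Removes characters from a list of tuples containing string"""
-- 	def refactoring(x):
-- 		clean = list()
-- 		characters = ["!","@","#","$","%","^","&","*","(",")","-","+","{","}","[","]","/","|",".",",","?",">","<","'",":",";",'"',"~",  "`",]
-- 		global_x = x[0]
-- 		for i in characters:
-- 			if i in global_x:
-- 				global_x = global_x.replace(i,"")
--
-- 		if global_x != str():
-- 			clean.append((global_x,))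
-- 			return clean[0]
-- 		else:
-- 			return x
--
--
-- 	no_character_ds = list(map(refactoring, dataset))
-- 	return no_character_ds
-- ===== SOURCE B (Python) =====
-- PUNCT = frozenset(["!","@","#","$","%","^","&","*","(",")","-","+","{","}","[","]","/","|",".",",","?",">","<","'",":",";",'"',"~","`"])
--
-- def characters_remover(dataset : list):
-- 	""" Removes characters from a list of tuples containing string (single pass per string)"""
-- 	def refactoring(x):
-- 		cleaned = ''.join(ch for ch in x[0] if ch not in PUNCT)
-- 		return (cleaned,) if cleaned else x
-- 	return list(map(refactoring, dataset))
-- ===== Notes on version B (the rewrite author's own statement) =====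
-- stated objective: idiomatic
-- what changed: Replaces the 29-iteration replace-scan loop per string with a single forward pass that filters characters through a frozenset and joins them, keeping the empty-result-returns-original-tuple branch.
import Mathlib
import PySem

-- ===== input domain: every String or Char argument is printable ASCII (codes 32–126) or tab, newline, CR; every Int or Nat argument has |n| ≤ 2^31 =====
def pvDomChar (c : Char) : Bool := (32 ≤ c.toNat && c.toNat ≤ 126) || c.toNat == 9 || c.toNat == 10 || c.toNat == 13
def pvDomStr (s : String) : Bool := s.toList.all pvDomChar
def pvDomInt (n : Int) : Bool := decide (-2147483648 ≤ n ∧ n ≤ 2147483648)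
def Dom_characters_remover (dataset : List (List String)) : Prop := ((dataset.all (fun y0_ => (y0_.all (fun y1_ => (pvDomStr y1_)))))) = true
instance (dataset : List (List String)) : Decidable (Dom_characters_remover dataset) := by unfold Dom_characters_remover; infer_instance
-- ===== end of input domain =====

-- B strips the 29 punctuation characters in one filtering pass per string (instead of one replace scan per punctuation character), same return value.

-- ===== PORT A =====
def charactersA : List String := ["!","@","#","$","%","^","&","*","(",")","-","+","{","}","[","]","/","|",".",",","?",">","<","'",":",";","\"","~","`"]

def refactoringA (x : List String) : List String :=
  match PySem.List.pyGet? x 0 with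
  | none => x   -- Python raises IndexError here; excluded by Pre_
  | some gx0 =>
    let gx := charactersA.foldl
      (fun gx i => if PySem.Str.isIn i gx then PySem.Str.replace gx i "" else gx) gx0
    if gx ≠ "" then [gx] else x

def characters_remover (dataset : List (List String)) : List (List String) :=
  dataset.map refactoringA

-- ===== PORT B =====
def punctB : PySem.Set Char := PySem.Set.ofList ['!','@','#','$','%','^','&','*','(',')','-','+','{','}','[',']','/','|','.',',','?','>','<','\'',':',';','\"','~','`']

def refactoringB (x : List String) : List String :=
  match PySem.List.pyGet? x 0 with
  | none => x   -- Python raises IndexError here; excluded by Pre_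
  | some s =>
    let cleaned := PySem.Str.join ""
      ((s.toList.filter (fun c => !(PySem.Set.contains punctB c))).map (fun c => String.ofList [c]))
    if cleaned ≠ "" then [cleaned] else x

def characters_remover_alt (dataset : List (List String)) : List (List String) :=
  dataset.map refactoringB

-- ===== PRECONDITION & SPEC =====
-- Pre_ excludes datasets containing an empty tuple, on which both A and B raise IndexError at x[0].
def Pre_characters_remover (dataset : List (List String)) : Prop := ∀ x ∈ dataset, x ≠ []
instance (dataset : List (List String)) : Decidable (Pre_characters_remover dataset) := by unfold Pre_characters_remover; infer_instance
def pvWitness_characters_remover : List (List String) := [["he!llo,", "x"], ["..."]]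

def Spec_characters_remover (dataset : List (List String)) (out : List (List String)) : Prop := out = characters_remover_alt dataset
instance (dataset : List (List String)) (out : List (List String)) : Decidable (Spec_characters_remover dataset out) := by unfold Spec_characters_remover; infer_instance

-- ===== CLAIM (what is proved, stated in full; the proofs are below) =====
def Claim_equal_characters_remover : Prop := ∀ (dataset : List (List String)), Dom_characters_remover dataset → Pre_characters_remover dataset → Spec_characters_remover dataset (characters_remover dataset)

-- ===== LEMMAS AND PROOFS =====

-- replace.go with single-char pattern and empty replacement computes a filter
theorem replace_go_single (c : Char) (l acc : List Char) (fuel : Nat) (h : l.length ≤ fuel) :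
    PySem.Chars.replace.go [c] [] fuel l acc = acc.reverse ++ l.filter (· ≠ c) := by
  induction l generalizing fuel acc with
  | nil => cases fuel <;> simp [PySem.Chars.replace.go]
  | cons d t ih =>
    cases fuel with
    | zero => simp at h
    | succ n =>
      have hn : t.length ≤ n := by simpa using h
      by_cases hd : c = d
      · subst hd
        simp [PySem.Chars.replace.go, List.isPrefixOf, ih acc n hn]
      · simp [PySem.Chars.replace.go, List.isPrefixOf, beq_false_of_ne hd,
          ih (d :: acc) n hn, Ne.symm hd]

-- s.replace(c, "") for a single character c is a filter
theorem replace_single (c : Char) (l : List Char) :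
    PySem.Chars.replace l [c] [] = l.filter (· ≠ c) := by
  simp [PySem.Chars.replace, replace_go_single c l [] l.length (le_refl _)]

-- one step of A's loop, at the String level
theorem stepA (c : Char) (s : String) :
    (if PySem.Str.isIn (String.ofList [c]) s then PySem.Str.replace s (String.ofList [c]) "" else s)
    = String.ofList (s.toList.filter (· ≠ c)) := by
  by_cases hin : PySem.Str.isIn (String.ofList [c]) s = true
  · rw [if_pos hin]
    apply String.toList_inj.mp
    simp [PySem.Str.toList_replace, String.toList_ofList, replace_single]
  · rw [if_neg hin]
    have hmem : c ∉ s.toList := by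
      intro hc
      apply hin
      rw [PySem.Str.isIn_eq, PySem.Chars.isIn_iff_infix, String.toList_ofList]
      exact (List.singleton_infix_iff c s.toList).mpr hc
    have : s.toList.filter (· ≠ c) = s.toList :=
      List.filter_eq_self.mpr (fun a ha => by simp; rintro rfl; exact hmem ha)
    rw [this, String.ofList_toList]

-- A's whole loop over a list of single-character search strings is one filter
theorem loopA (cs : List Char) (s : String) :
    (cs.map (fun c => String.ofList [c])).foldl
      (fun gx i => if PySem.Str.isIn i gx then PySem.Str.replace gx i "" else gx) s
    = String.ofList (s.toList.filter (fun ch => !cs.contains ch)) := by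
  induction cs generalizing s with
  | nil => simp [String.ofList_toList]
  | cons c cs ih =>
    simp only [List.map_cons, List.foldl_cons, stepA, ih, String.toList_ofList,
      List.filter_filter]
    congr 1
    apply List.filter_congr
    intro a _
    by_cases hac : a = c <;> simp [hac]

-- B's join of filtered single-character strings is the same filter
theorem joinB (l : List Char) :
    PySem.Str.join "" (l.map (fun c => String.ofList [c])) = String.ofList l := by
  apply String.toList_inj.mp
  rw [PySem.Str.toList_join, List.map_map]
  have : (String.toList ∘ fun c => String.ofList [c]) = (fun c : Char => [c]) := by
    funext c; simp [String.toList_ofList]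
  rw [this]
  simp [PySem.Chars.join_nil_singletons l]

-- per-element agreement on nonempty tuples
theorem refactoring_eq (x : List String) (hx : x ≠ []) : refactoringA x = refactoringB x := by
  obtain ⟨h, t, rfl⟩ := List.exists_cons_of_ne_nil hx
  unfold refactoringA refactoringB
  rw [PySem.List.pyGet?_zero_cons]
  have hchars : charactersA = (['!','@','#','$','%','^','&','*','(',')','-','+','{','}','[',']','/','|','.',',','?','>','<','\'',':',';','\"','~','`'].map (fun c => String.ofList [c])) := by decide
  have hpred : ∀ a : Char, (!(List.contains ['!','@','#','$','%','^','&','*','(',')','-','+','{','}','[',']','/','|','.',',','?','>','<','\'',':',';','\"','~','`'] a)) = (!(PySem.Set.contains punctB a)) := by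
    intro a
    have hmem : a ∈ punctB ↔ a ∈ (['!','@','#','$','%','^','&','*','(',')','-','+','{','}','[',']','/','|','.',',','?','>','<','\'',':',';','\"','~','`'] : List Char) := by
      unfold punctB; exact PySem.Set.mem_ofList _ _
    by_cases h : a ∈ (['!','@','#','$','%','^','&','*','(',')','-','+','{','}','[',']','/','|','.',',','?','>','<','\'',':',';','\"','~','`'] : List Char)
    · rw [show List.contains _ a = true by simpa using h,
        (PySem.Set.contains_iff punctB a).mpr (hmem.mpr h)]
    · rw [show List.contains _ a = false by simpa using h,
        show PySem.Set.contains punctB a = false by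
          rw [Bool.eq_false_iff]; intro hc
          exact h (hmem.mp ((PySem.Set.contains_iff punctB a).mp hc))]
  simp only [hchars, loopA, joinB]
  rw [List.filter_congr (fun a _ => hpred a)]

-- ===== VERDICT (by name: the statement is the Claim_ definition above) =====
theorem characters_remover_spec : Claim_equal_characters_remover := by
  intro ds _ hpre
  unfold Spec_characters_remover characters_remover characters_remover_alt
  exact List.map_congr_left (fun x hx => refactoring_eq x (hpre x hx))
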